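-- pv_equiv track=rewrite | github.com/lame26/knocbadminton | data_manager.py | _split_groups
-- ===== SOURCE A (Python) =====
-- def _split_groups(total):
--     """조 분할 알고리즘"""
--     best, min_fours = None, total
--     for n6 in range(total // 6, -1, -1):
--         rem = total - n6 * 6
--         for n5 in range(rem // 5, -1, -1):
--             rem2 = rem - n5 * 5
--             if rem2 % 4 == 0:
--                 n4 = rem2 // 4
--                 if n4 <= min_fours:
--                     min_fours = n4
--                     best = [6] * n6 + [5] * n5 + [4] * n4
--     return best
-- ===== SOURCE B (Python) =====
-- def _split_groups(total):
--     """Iterate n4 ascending; for each, solve 6*n6 + 5*n5 = total - 4*n4 by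
--     modular arithmetic (smallest n6 has n6 = target % 5), returning at the
--     first feasible n4."""
--     n4 = 0
--     while n4 <= total // 4:
--         target = total - 4 * n4
--         n6 = target % 5
--         if 6 * n6 <= target:
--             n5 = (target - 6 * n6) // 5
--             return [6] * n6 + [5] * n5 + [4] * n4
--         n4 += 1
--     return None
-- ===== Notes on version B (the rewrite author's own statement) =====
-- stated objective: faster
-- what changed: Replaces the nested descending scan over all counts of the two larger group sizes by a single ascending loop over the count of the smallest size, solving for the other two counts directly by modular arithmetic on the remaining target and returning at the first feasible count.
import Mathlib
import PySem

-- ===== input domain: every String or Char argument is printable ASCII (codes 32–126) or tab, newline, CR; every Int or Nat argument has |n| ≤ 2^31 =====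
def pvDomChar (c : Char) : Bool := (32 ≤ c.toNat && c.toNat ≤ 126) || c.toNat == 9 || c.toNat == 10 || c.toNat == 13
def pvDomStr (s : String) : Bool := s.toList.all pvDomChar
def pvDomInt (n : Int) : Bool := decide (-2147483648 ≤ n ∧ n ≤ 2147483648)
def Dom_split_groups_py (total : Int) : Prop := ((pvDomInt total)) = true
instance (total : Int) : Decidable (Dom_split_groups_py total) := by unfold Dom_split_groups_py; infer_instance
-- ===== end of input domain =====

-- B replaces A's nested descending (n6, n5) scan by a single ascending loop over n4,
-- solving for n6 and n5 directly by modular arithmetic on the remaining target; objective: faster.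

-- ===== PORT A =====
-- inner loop body of A (for fixed n6, rem = total - n6*6); rem2 = rem - n5*5, n4 = rem2 // 4
def aStep (n6 rem : Int) (st : Option (List Int) × Int) (n5 : Int) : Option (List Int) × Int :=
  if PySem.Int.mod (rem - n5 * 5) 4 = 0 then
    if PySem.Int.floordiv (rem - n5 * 5) 4 ≤ st.2 then
      (some (List.replicate n6.toNat 6 ++ List.replicate n5.toNat 5 ++
             List.replicate (PySem.Int.floordiv (rem - n5 * 5) 4).toNat 4),
       PySem.Int.floordiv (rem - n5 * 5) 4)
    else st
  else st

-- one iteration of A's outer loop: the whole inner 'for n5' loop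
def aInner (total : Int) (st : Option (List Int) × Int) (n6 : Int) : Option (List Int) × Int :=
  (PySem.List.pyRange (PySem.Int.floordiv (total - n6 * 6) 5) (-1) (-1)).foldl
    (aStep n6 (total - n6 * 6)) st

def split_groups_py (total : Int) : Option (List Int) :=
  ((PySem.List.pyRange (PySem.Int.floordiv total 6) (-1) (-1)).foldl (aInner total)
    (none, total)).1

-- ===== PORT B =====
-- B's while loop; fuel = number of remaining candidate n4 values (enough to exhaust the
-- loop: the while condition 'n4 ≤ total // 4' is re-checked each round); target = total - 4*n4
def altGo (total : Int) (n4 : Int) : Nat → Option (List Int)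
  | 0 => none
  | Nat.succ fuel =>
    if n4 ≤ PySem.Int.floordiv total 4 then
      if 6 * PySem.Int.mod (total - 4 * n4) 5 ≤ total - 4 * n4 then
        some (List.replicate (PySem.Int.mod (total - 4 * n4) 5).toNat 6 ++
              List.replicate (PySem.Int.floordiv
                (total - 4 * n4 - 6 * PySem.Int.mod (total - 4 * n4) 5) 5).toNat 5 ++
              List.replicate n4.toNat 4)
      else altGo total (n4 + 1) fuel
    else none

def split_groups_py_alt (total : Int) : Option (List Int) :=
  altGo total 0 (PySem.Int.floordiv total 4 + 1).toNat

-- ===== PRECONDITION & SPEC =====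
def Spec_split_groups_py (total : Int) (out : Option (List Int)) : Prop := out = split_groups_py_alt total
instance (total : Int) (out : Option (List Int)) : Decidable (Spec_split_groups_py total out) := by unfold Spec_split_groups_py; infer_instance

-- ===== CLAIM (what is proved, stated in full; the proofs are below) =====
def Claim_equal_split_groups_py : Prop := ∀ (total : Int), Dom_split_groups_py total → Spec_split_groups_py total (split_groups_py total)

-- ===== LEMMAS AND PROOFS =====

-- a fold whose body fixes the start state returns it
lemma pvFoldlFix {α β : Type} (f : α → β → α) (l : List β) (s : α)
    (h : ∀ x ∈ l, f s x = s) : l.foldl f s = s := by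
  induction l with
  | nil => rfl
  | cons a t ih =>
    simp only [List.foldl_cons, h a (List.mem_cons_self)]
    exact ih (fun x hx => h x (List.mem_cons_of_mem _ hx))

lemma aStep_id (n6 rem : Int) (st : Option (List Int) × Int) (n5 : Int)
    (hst : st.2 = 0) (hpos : 0 < rem - n5 * 5) : aStep n6 rem st n5 = st := by
  unfold aStep
  split_ifs with h1 h2
  · exfalso
    rw [PySem.Int.mod_eq_zero_iff_dvd] at h1
    rw [PySem.Int.floordiv_eq_ediv_of_pos (by norm_num)] at h2
    omega
  · rfl
  · rfl

lemma aStep_nonneg (n6 rem : Int) (st : Option (List Int) × Int) (n5 : Int)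
    (hst : 0 ≤ st.2) (h : n5 * 5 ≤ rem) : 0 ≤ (aStep n6 rem st n5).2 := by
  unfold aStep
  split_ifs with h1 h2
  · show 0 ≤ PySem.Int.floordiv (rem - n5 * 5) 4
    rw [PySem.Int.floordiv_eq_ediv_of_pos (by norm_num)]
    omega
  · exact hst
  · exact hst

lemma aInner_nonneg (total : Int) (st : Option (List Int) × Int) (n6 : Int)
    (h : 0 ≤ st.2) : 0 ≤ (aInner total st n6).2 := by
  unfold aInner
  refine List.foldlRecOn (motive := fun (s : Option (List Int) × Int) => 0 ≤ s.2) _ _ h ?_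
  intro b hb n5 hn5
  rw [PySem.List.mem_pyRange_neg_one] at hn5
  refine aStep_nonneg _ _ _ _ hb ?_
  have := hn5.2
  rwa [PySem.Int.le_floordiv_iff_mul_le (by norm_num)] at this

lemma aInner_id (total : Int) (st : Option (List Int) × Int) (n6 : Int)
    (hst : st.2 = 0) (h5 : ¬ (5:Int) ∣ (total - n6 * 6)) : aInner total st n6 = st := by
  unfold aInner
  refine pvFoldlFix _ _ _ ?_
  intro n5 hn5
  rw [PySem.List.mem_pyRange_neg_one] at hn5
  have hle : n5 * 5 ≤ total - n6 * 6 := by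
    have := hn5.2
    rwa [PySem.Int.le_floordiv_iff_mul_le (by norm_num)] at this
  refine aStep_id _ _ _ _ hst ?_
  rcases lt_or_eq_of_le hle with hlt | heq
  · omega
  · exact absurd ⟨n5, by omega⟩ h5

lemma aInner_hit (total : Int) (st : Option (List Int) × Int) (n6 : Int)
    (h0 : 0 ≤ st.2) (h5 : (5:Int) ∣ (total - n6 * 6)) (hrem : 0 ≤ total - n6 * 6) :
    aInner total st n6 =
      (some (List.replicate n6.toNat 6 ++
             List.replicate (PySem.Int.floordiv (total - n6 * 6) 5).toNat 5 ++
             List.replicate ((0:Int)).toNat 4), 0) := by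
  unfold aInner
  set rem := total - n6 * 6 with hremdef
  have hfd : PySem.Int.floordiv rem 5 = rem / 5 := PySem.Int.floordiv_eq_ediv_of_pos (by norm_num)
  have hr5 : (0:Int) ≤ PySem.Int.floordiv rem 5 := by rw [hfd]; omega
  have hexact : rem - PySem.Int.floordiv rem 5 * 5 = 0 := by rw [hfd]; omega
  rw [PySem.List.pyRange_neg_one_cons (by omega), List.foldl_cons]
  have hstep : aStep n6 rem st (PySem.Int.floordiv rem 5) =
      (some (List.replicate n6.toNat 6 ++
             List.replicate (PySem.Int.floordiv rem 5).toNat 5 ++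
             List.replicate ((0:Int)).toNat 4), 0) := by
    unfold aStep
    have hd : PySem.Int.floordiv (0:Int) 4 = 0 := by decide
    simp only [hexact, hd]
    rw [if_pos (show PySem.Int.mod (0:Int) 4 = 0 by decide), if_pos h0]
  rw [hstep]
  refine pvFoldlFix _ _ _ ?_
  intro n5 hn5
  rw [PySem.List.mem_pyRange_neg_one] at hn5
  refine aStep_id _ _ _ _ rfl ?_
  have := hn5.2
  omega

-- A on totals ≥ 24: the nested scan ends at the n4 = 0 candidate with minimal n6 = total % 5
lemma A_big (total : Int) (h : 24 ≤ total) :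
    split_groups_py total =
      some (List.replicate (PySem.Int.mod total 5).toNat 6 ++
            List.replicate (PySem.Int.floordiv (total - (PySem.Int.mod total 5) * 6) 5).toNat 5 ++
            List.replicate ((0:Int)).toNat 4) := by
  unfold split_groups_py
  set r := PySem.Int.mod total 5 with hrdef
  have hmod : r = total % 5 := PySem.Int.mod_eq_emod_of_pos (by norm_num)
  have hr0 : 0 ≤ r := by omega
  have hr4 : r ≤ 4 := by omega
  have hT6 : PySem.Int.floordiv total 6 = total / 6 := PySem.Int.floordiv_eq_ediv_of_pos (by norm_num)
  have hT6ge : r ≤ PySem.Int.floordiv total 6 := by omega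
  -- split the outer countdown range at r
  have hup : PySem.List.pyRange 0 (PySem.Int.floordiv total 6 + 1) 1 =
      PySem.List.pyRange 0 (r + 1) 1 ++ PySem.List.pyRange (r + 1) (PySem.Int.floordiv total 6 + 1) 1 :=
    PySem.List.pyRange_one_append 0 (r + 1) (PySem.Int.floordiv total 6 + 1) (by omega) (by omega)
  have hrev0 : ∀ a : Int, PySem.List.pyRange a (-1) (-1) =
      (PySem.List.pyRange 0 (a + 1) 1).reverse := by
    intro a
    rw [PySem.List.pyRange_neg_one_eq_reverse]
    norm_num
  have h1 : (PySem.List.pyRange (r + 1) (PySem.Int.floordiv total 6 + 1) 1).reverse =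
      PySem.List.pyRange (PySem.Int.floordiv total 6) r (-1) :=
    (PySem.List.pyRange_neg_one_eq_reverse _ _).symm
  have h2 : (PySem.List.pyRange 0 (r + 1) 1).reverse =
      r :: PySem.List.pyRange (r - 1) (-1) (-1) := by
    rw [← hrev0 r]
    exact PySem.List.pyRange_neg_one_cons (by omega)
  have hsplit : PySem.List.pyRange (PySem.Int.floordiv total 6) (-1) (-1) =
      PySem.List.pyRange (PySem.Int.floordiv total 6) r (-1) ++
        (r :: PySem.List.pyRange (r - 1) (-1) (-1)) := by
    rw [hrev0 (PySem.Int.floordiv total 6), hup, List.reverse_append, h1, h2]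
  rw [hsplit, List.foldl_append, List.foldl_cons]
  -- phase 1: descending n6 > r; only need that min_fours stays ≥ 0
  have hph1 : 0 ≤ ((PySem.List.pyRange (PySem.Int.floordiv total 6) r (-1)).foldl
      (aInner total) (none, total)).2 := by
    refine List.foldlRecOn (motive := fun (s : Option (List Int) × Int) => 0 ≤ s.2) _ _
      (show (0:Int) ≤ total by omega) ?_
    intro b hb n6 _
    exact aInner_nonneg total b n6 hb
  -- phase 2: n6 = r hits the optimal candidate
  have hdvd : (5:Int) ∣ (total - r * 6) := by omega
  rw [aInner_hit total _ r hph1 hdvd (by omega)]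
  -- phase 3: n6 < r never improves on n4 = 0
  refine Eq.trans (congrArg Prod.fst (pvFoldlFix _ _ _ ?_)) rfl
  intro n6 hn6
  rw [PySem.List.mem_pyRange_neg_one] at hn6
  refine aInner_id total _ n6 rfl ?_
  omega

-- B on totals ≥ 24: the first iteration (n4 = 0) already succeeds
lemma B_big (total : Int) (h : 24 ≤ total) :
    split_groups_py_alt total =
      some (List.replicate (PySem.Int.mod total 5).toNat 6 ++
            List.replicate (PySem.Int.floordiv (total - 6 * PySem.Int.mod total 5) 5).toNat 5 ++
            List.replicate ((0:Int)).toNat 4) := by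
  unfold split_groups_py_alt
  have hfd : PySem.Int.floordiv total 4 = total / 4 := PySem.Int.floordiv_eq_ediv_of_pos (by norm_num)
  have hmod : PySem.Int.mod total 5 = total % 5 := PySem.Int.mod_eq_emod_of_pos (by norm_num)
  obtain ⟨k, hk⟩ : ∃ k, (PySem.Int.floordiv total 4 + 1).toNat = k + 1 :=
    ⟨(PySem.Int.floordiv total 4).toNat, by omega⟩
  rw [hk]
  have hc : 6 * PySem.Int.mod (total - 4 * 0) 5 ≤ total - 4 * 0 := by
    rw [show total - 4 * 0 = total by ring, hmod]
    omega
  show altGo total 0 (k + 1) = _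
  unfold altGo
  rw [if_pos (show (0:Int) ≤ PySem.Int.floordiv total 4 by omega), if_pos hc]
  norm_num

theorem pv_main (total : Int) : split_groups_py total = split_groups_py_alt total := by
  by_cases h24 : 24 ≤ total
  · rw [A_big total h24, B_big total h24,
        show total - PySem.Int.mod total 5 * 6 = total - 6 * PySem.Int.mod total 5 by ring]
  · by_cases h0 : 0 ≤ total
    · interval_cases total <;> decide
    · -- negative totals: both loops run zero iterations
      have hA : split_groups_py total = none := by
        unfold split_groups_py
        rw [PySem.List.pyRange_neg_one_eq_nil
          (by rw [PySem.Int.floordiv_eq_ediv_of_pos (by norm_num)]; omega)]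
        rfl
      have hB : split_groups_py_alt total = none := by
        unfold split_groups_py_alt
        rw [show (PySem.Int.floordiv total 4 + 1).toNat = 0 by
          rw [PySem.Int.floordiv_eq_ediv_of_pos (by norm_num)]; omega]
        rfl
      rw [hA, hB]

-- ===== VERDICT (by name: the statement is the Claim_ definition above) =====
theorem split_groups_py_spec : Claim_equal_split_groups_py := by
  intro total _
  exact pv_main total
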